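-- pv_equiv track=rewrite | github.com/de-code/layered-vision | layered_vision/utils/dist.py | get_required_and_extras
-- ===== SOURCE A (Python) =====
-- def get_required_and_extras(required_packages_with_groups, include_all=True):
--     grouped_extras = {}
--     all_groups = ['all'] if include_all else []
--     for requirement, groups in required_packages_with_groups:
--         for group in groups + all_groups:
--             grouped_extras.setdefault(group, []).append(requirement)
--     return (
--         grouped_extras.get(None, []),
--         {key: value for key, value in grouped_extras.items() if key}
--     )
-- ===== SOURCE B (Python) =====
-- def get_required_and_extras(required_packages_with_groups, include_all=True):
--     items = required_packages_with_groups
--     suffix = ['all'] if include_all else []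
--     # distinct group keys in first-occurrence order (None included, filtered later)
--     keys = []
--     for _, groups in items:
--         for g in groups + suffix:
--             if g not in keys:
--                 keys.append(g)
--     required = [req for req, groups in items for g in groups if g is None]
--     extras = {
--         key: [req for req, groups in items for g in groups + suffix if g == key]
--         for key in keys
--         if key
--     }
--     return required, extras
-- ===== Notes on version B (the rewrite author's own statement) =====
-- stated objective: alternative
-- what changed: A builds every group's member list in one pass via dict setdefault/append; B first collects the distinct group keys in first-occurrence order and then, for each key, rescans the whole input with a comprehension to gather that group's requirements, building the required list and the extras dict by independent filters.
import Mathlib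
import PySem

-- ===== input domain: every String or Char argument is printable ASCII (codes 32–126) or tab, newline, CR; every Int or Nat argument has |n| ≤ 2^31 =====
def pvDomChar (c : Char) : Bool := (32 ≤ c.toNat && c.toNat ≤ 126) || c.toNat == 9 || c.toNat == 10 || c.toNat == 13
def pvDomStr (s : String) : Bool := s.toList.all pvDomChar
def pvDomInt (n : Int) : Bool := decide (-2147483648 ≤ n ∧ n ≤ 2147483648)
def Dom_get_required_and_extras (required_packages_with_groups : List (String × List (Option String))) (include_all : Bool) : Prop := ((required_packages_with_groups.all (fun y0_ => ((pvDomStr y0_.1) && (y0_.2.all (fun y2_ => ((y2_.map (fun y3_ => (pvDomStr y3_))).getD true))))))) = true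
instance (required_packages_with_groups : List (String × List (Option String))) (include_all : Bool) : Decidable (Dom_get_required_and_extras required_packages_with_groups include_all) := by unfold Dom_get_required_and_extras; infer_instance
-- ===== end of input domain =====

-- B collects the distinct group keys first and then gathers each group's members by an
-- independent rescan, instead of A's single-pass dict setdefault/append ('alternative').

-- ===== PORT A =====
def get_required_and_extras (required_packages_with_groups : List (String × List (Option String))) (include_all : Bool) : List String × (List (String × List String)) :=
  let all_groups : List (Option String) := if include_all then [some "all"] else []
  let grouped_extras : PySem.Dict (Option String) (List String) :=
    required_packages_with_groups.foldl
      (fun d p => (p.2 ++ all_groups).foldl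
        (fun d g => d.modify g [] (fun v => v ++ [p.1])) d)
      PySem.Dict.empty
  ( grouped_extras.getD none [],
    grouped_extras.items.filterMap (fun kv =>
      match kv.1 with
      | none => none
      | some s => if s = "" then none else some (s, kv.2)) )

-- ===== PORT B =====
def get_required_and_extras_alt (required_packages_with_groups : List (String × List (Option String))) (include_all : Bool) : List String × (List (String × List String)) :=
  let suffix : List (Option String) := if include_all then [some "all"] else []
  let keys : PySem.Set (Option String) :=
    required_packages_with_groups.foldl
      (fun ks p => (p.2 ++ suffix).foldl (fun ks g => PySem.Set.add ks g) ks)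
      PySem.Set.empty
  let required : List String :=
    required_packages_with_groups.flatMap
      (fun p => (p.2.filter (fun g => g == (none : Option String))).map (fun _ => p.1))
  let extras : List (String × List String) :=
    keys.filterMap (fun k =>
      match k with
      | none => none
      | some s =>
        if s = "" then none
        else some (s, required_packages_with_groups.flatMap
          (fun p => ((p.2 ++ suffix).filter (fun g => g == k)).map (fun _ => p.1))))
  (required, extras)

-- ===== PRECONDITION & SPEC =====
def Spec_get_required_and_extras (required_packages_with_groups : List (String × List (Option String))) (include_all : Bool) (out : List String × (List (String × List String))) : Prop := out = get_required_and_extras_alt required_packages_with_groups include_all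
instance (required_packages_with_groups : List (String × List (Option String))) (include_all : Bool) (out : List String × (List (String × List String))) : Decidable (Spec_get_required_and_extras required_packages_with_groups include_all out) := by unfold Spec_get_required_and_extras; infer_instance

-- ===== CLAIM (what is proved, stated in full; the proofs are below) =====
def Claim_equal_get_required_and_extras : Prop := ∀ (required_packages_with_groups : List (String × List (Option String))) (include_all : Bool), Dom_get_required_and_extras required_packages_with_groups include_all → Spec_get_required_and_extras required_packages_with_groups include_all (get_required_and_extras required_packages_with_groups include_all)

-- ===== LEMMAS AND PROOFS =====

-- the flattened stream of (group, requirement) occurrences both programs traverse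
def pvFlat (suffix : List (Option String)) (rs : List (String × List (Option String))) : List (Option String × String) :=
  rs.flatMap (fun p => (p.2 ++ suffix).map (fun g => (g, p.1)))

lemma pvFlat_cons (suffix : List (Option String)) (p : String × List (Option String)) (rs : List (String × List (Option String))) :
    pvFlat suffix (p :: rs) = (p.2 ++ suffix).map (fun g => (g, p.1)) ++ pvFlat suffix rs := by
  simp [pvFlat]

lemma flattenA (suffix : List (Option String)) (rs : List (String × List (Option String)))
    (d : PySem.Dict (Option String) (List String)) :
    rs.foldl (fun d p => (p.2 ++ suffix).foldl (fun d g => d.modify g [] (fun v => v ++ [p.1])) d) d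
      = (pvFlat suffix rs).foldl (fun d x => d.modify x.1 [] (fun v => v ++ [x.2])) d := by
  induction rs generalizing d with
  | nil => simp [pvFlat]
  | cons p rs ih =>
    rw [List.foldl_cons, ih, pvFlat_cons]
    conv_rhs => rw [List.foldl_append, List.foldl_map]

lemma flattenB (suffix : List (Option String)) (rs : List (String × List (Option String)))
    (ks : PySem.Set (Option String)) :
    rs.foldl (fun ks p => (p.2 ++ suffix).foldl (fun ks g => PySem.Set.add ks g) ks) ks
      = (pvFlat suffix rs).foldl (fun ks x => PySem.Set.add ks x.1) ks := by
  induction rs generalizing ks with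
  | nil => simp [pvFlat]
  | cons p rs ih =>
    rw [List.foldl_cons, ih, pvFlat_cons]
    conv_rhs => rw [List.foldl_append, List.foldl_map]

-- the per-key value: filtering the flattened stream = B's per-key comprehension
lemma vals_eq (suffix : List (Option String)) (rs : List (String × List (Option String))) (k : Option String) :
    ((pvFlat suffix rs).filter (fun x => x.1 == k)).map (·.2)
      = rs.flatMap (fun p => ((p.2 ++ suffix).filter (fun g => g == k)).map (fun _ => p.1)) := by
  induction rs with
  | nil => simp [pvFlat]
  | cons p rs ih =>
    rw [pvFlat_cons, List.filter_append, List.map_append, ih, List.flatMap_cons]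
    congr 1
    rw [List.filter_map, List.map_map]
    rfl

-- a dict with distinct keys is its key list paired with its values
lemma items_eq_keys_map (d : PySem.Dict (Option String) (List String)) (h : d.keys.Nodup) :
    d.items = d.keys.map (fun k => (k, d.getD k [])) := by
  conv_lhs => rw [← List.map_id d.items]
  simp only [PySem.Dict.keys, List.map_map]
  apply List.map_congr_left
  intro p hp
  have hp' : (p.1, p.2) ∈ d.items := by simpa using hp
  have hv : d.getD p.1 [] = p.2 := PySem.Dict.getD_of_mem_items d hp' h []
  simp [Function.comp, hv]

theorem get_required_and_extras_equal (rs : List (String × List (Option String))) (include_all : Bool) :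
    get_required_and_extras rs include_all = get_required_and_extras_alt rs include_all := by
  unfold get_required_and_extras get_required_and_extras_alt
  set suffix : List (Option String) := if include_all then [some "all"] else [] with hsuf
  simp only []
  rw [flattenA suffix rs, flattenB suffix rs]
  set L := pvFlat suffix rs with hL
  set d := L.foldl (fun d x => d.modify x.1 [] (fun v => v ++ [x.2])) PySem.Dict.empty with hd
  have hkeys : d.keys = PySem.Set.ofList (L.map Prod.fst) := by
    rw [hd, PySem.Dict.keys_foldl_modify_key]
    rfl
  have hnodup : d.keys.Nodup := by
    rw [hkeys]; exact PySem.Set.nodup_ofList _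
  have hgetD : ∀ k, d.getD k [] = ((L.filter (fun x => x.1 == k)).map (·.2)) := by
    intro k
    rw [hd, PySem.Dict.getD_foldl_modify_append]
    simp
  have hkeysB : L.foldl (fun ks x => PySem.Set.add ks x.1) PySem.Set.empty = d.keys := by
    rw [hkeys, ← PySem.Set.update_map_eq_foldl_add]
    rfl
  have hsufnone : suffix.filter (fun g => g == (none : Option String)) = [] := by
    rw [hsuf]; cases include_all <;> simp
  congr 1
  · -- required component
    rw [hgetD none, hL, vals_eq]
    congr 1
    funext p
    rw [List.filter_append, hsufnone, List.append_nil]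
  · -- extras component
    rw [items_eq_keys_map d hnodup, List.filterMap_map, hkeysB]
    congr 1
    funext k
    cases k with
    | none => rfl
    | some s =>
      simp only [Function.comp]
      by_cases hs : s = "" <;> simp [hs, hgetD (some s), hL, vals_eq]

-- ===== VERDICT (by name: the statement is the Claim_ definition above) =====
theorem get_required_and_extras_spec : Claim_equal_get_required_and_extras := by
  intro rs include_all _
  unfold Spec_get_required_and_extras
  exact get_required_and_extras_equal rs include_all
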